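-- pv_equiv track=rewrite | github.com/Olle7/uldistatud-tehtem-rgi-funktsioon | aTXb/aTXb V (töötab).py | leia_sulgude_siseseim_avaldis
-- ===== SOURCE A (Python) =====
-- def leia_sulgude_siseseim_avaldis(avaldis):
--     s=0
--     s_max=0
--     Sid=[]
--     sulgude_siseseim_avaldis=""
--     for mark in(list(avaldis)):
--         if mark =="(":#kui vaadeldav tähemärk on "(",siis sulgude sisesus +=1
--             s+=1
--         elif mark ==")":#kui vaadeldav tähemärk on "(",siis sulgude sisesus +=-1
--             s+=-1
--         Sid.append(s)#lisa kõikide märkide sulgude sisesus arv hulka Sid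
--     for indeks in range(Sid.index(max(Sid))+1,Sid.index(max(Sid))+Sid.count(max(Sid)),1):#maksimaalseste sulusisesustega tähtede indeksid
--         if Sid[indeks]!=max(Sid):
--             break
--         sulgude_siseseim_avaldis+=list(avaldis)[indeks]#vastava indeksiga täht liida avaldisse
--     return(sulgude_siseseim_avaldis)
-- ===== SOURCE B (Python) =====
-- def leia_sulgude_siseseim_avaldis(avaldis):
--     # Single left-to-right pass: track current depth, the best (max) depth seen,
--     # and collect the contiguous run of characters following the first character
--     # that reaches the max depth.
--     s = 0
--     best = None
--     buf = []
--     collecting = False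
--     for ch in avaldis:
--         if ch == "(":
--             s += 1
--         elif ch == ")":
--             s -= 1
--         if best is None or s > best:
--             best = s
--             buf = []
--             collecting = True
--         elif collecting and s == best:
--             buf.append(ch)
--         else:
--             collecting = False
--     return "".join(buf)
-- ===== Notes on version B (the rewrite author's own statement) =====
-- stated objective: faster
-- what changed: Replaces A's build-depth-list-then-rescan approach (list(avaldis) copies, max/index/count scans, and a loop that recomputes max(Sid) on every iteration, O(n^2) worst case) by a single left-to-right pass that tracks current depth, best depth and the contiguous run after the first character reaching the best depth.
-- crash fix: On the empty string A raises ValueError (max of empty sequence); B returns the empty string. — e.g. on leia_sulgude_siseseim_avaldis(""): A raises ValueError, B returns ""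
import Mathlib
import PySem

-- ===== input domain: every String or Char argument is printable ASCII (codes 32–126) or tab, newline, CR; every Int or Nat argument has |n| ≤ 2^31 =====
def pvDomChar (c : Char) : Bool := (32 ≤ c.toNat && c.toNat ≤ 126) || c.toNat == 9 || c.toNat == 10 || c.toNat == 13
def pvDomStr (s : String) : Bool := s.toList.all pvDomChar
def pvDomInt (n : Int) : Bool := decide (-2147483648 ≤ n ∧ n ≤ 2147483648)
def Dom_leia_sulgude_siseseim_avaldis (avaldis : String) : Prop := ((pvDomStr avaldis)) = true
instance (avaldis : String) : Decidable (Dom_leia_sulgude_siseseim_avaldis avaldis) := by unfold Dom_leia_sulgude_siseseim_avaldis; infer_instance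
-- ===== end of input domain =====

-- B replaces A's build-depth-list-then-rescan (max/index/count passes plus a loop that
-- recomputes max(Sid) each iteration) by a single pass; objective: faster.

-- ===== PORT A =====
-- literal transliteration of A: build Sid (depth after each char), then walk
-- range(Sid.index(max(Sid))+1, Sid.index(max(Sid))+Sid.count(max(Sid))) with a break flag.
def leia_sulgude_siseseim_avaldis (avaldis : String) : String :=
  let chars := avaldis.toList
  let fin := chars.foldl
    (fun (st : Int × List Int) mark =>
      let s := if mark = '(' then st.1 + 1
               else if mark = ')' then st.1 - 1 else st.1
      (s, st.2 ++ [s]))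
    (0, [])
  let Sid := fin.2
  match PySem.List.max? Sid id with
  | none => ""   -- Python: max([]) raises ValueError on the empty string; excluded by Pre_
  | some m =>
    let i0 : Nat := (PySem.List.index? Sid m).getD 0
    let cnt : Nat := PySem.List.count Sid m
    let res := (PySem.List.pyRange ((i0 : Int) + 1) ((i0 : Int) + (cnt : Int)) 1).foldl
      (fun (st : List Char × Bool) indeks =>
        if st.2 then st   -- after 'break'
        -- the range's indices are always in bounds (proved below), so the defaults are never read
        else if PySem.List.pyGetD Sid indeks 0 ≠ m then (st.1, true)
        else (st.1 ++ [PySem.List.pyGetD chars indeks ' '], st.2))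
      ([], false)
    String.ofList res.1

-- ===== PORT B =====
-- literal transliteration of Source B: one pass tracking (s, best, buf, collecting).
def leia_sulgude_siseseim_avaldis_alt (avaldis : String) : String :=
  let fin := avaldis.toList.foldl
    (fun (st : Int × Option Int × List Char × Bool) ch =>
      let s := if ch = '(' then st.1 + 1 else if ch = ')' then st.1 - 1 else st.1
      match st.2.1 with
      | none => (s, some s, ([] : List Char), true)
      | some b =>
        if b < s then (s, some s, ([] : List Char), true)
        else if st.2.2.2 ∧ s = b then (s, some b, st.2.2.1 ++ [ch], true)
        else (s, some b, st.2.2.1, false))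
    (0, none, [], false)
  String.ofList fin.2.2.1

-- ===== PRECONDITION & SPEC =====
-- Pre_ excludes only the empty string, on which Python A raises ValueError (max of empty sequence).
def Pre_leia_sulgude_siseseim_avaldis (avaldis : String) : Prop := avaldis ≠ ""
instance (avaldis : String) : Decidable (Pre_leia_sulgude_siseseim_avaldis avaldis) := by unfold Pre_leia_sulgude_siseseim_avaldis; infer_instance
def pvWitness_leia_sulgude_siseseim_avaldis : String := "a(b)c"

-- On the empty string A raises ValueError (max() of empty sequence); B returns "".
def Raises_leia_sulgude_siseseim_avaldis (avaldis : String) : Prop := avaldis = ""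
instance (avaldis : String) : Decidable (Raises_leia_sulgude_siseseim_avaldis avaldis) := by unfold Raises_leia_sulgude_siseseim_avaldis; infer_instance
def pvRaiseWitness_leia_sulgude_siseseim_avaldis : String := ""
def pvRaiseWitnessOut_leia_sulgude_siseseim_avaldis : String := ""

def Spec_leia_sulgude_siseseim_avaldis (avaldis : String) (out : String) : Prop := out = leia_sulgude_siseseim_avaldis_alt avaldis
instance (avaldis : String) (out : String) : Decidable (Spec_leia_sulgude_siseseim_avaldis avaldis out) := by unfold Spec_leia_sulgude_siseseim_avaldis; infer_instance

-- ===== CLAIM (what is proved, stated in full; the proofs are below) =====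
def Claim_equal_leia_sulgude_siseseim_avaldis : Prop := ∀ (avaldis : String), Dom_leia_sulgude_siseseim_avaldis avaldis → Pre_leia_sulgude_siseseim_avaldis avaldis → Spec_leia_sulgude_siseseim_avaldis avaldis (leia_sulgude_siseseim_avaldis avaldis)
def Claim_raises_leia_sulgude_siseseim_avaldis : Prop := (∀ (avaldis : String), Dom_leia_sulgude_siseseim_avaldis avaldis → Raises_leia_sulgude_siseseim_avaldis avaldis → ¬ Pre_leia_sulgude_siseseim_avaldis avaldis) ∧ (Dom_leia_sulgude_siseseim_avaldis (pvRaiseWitness_leia_sulgude_siseseim_avaldis) ∧ Raises_leia_sulgude_siseseim_avaldis (pvRaiseWitness_leia_sulgude_siseseim_avaldis) ∧ leia_sulgude_siseseim_avaldis_alt (pvRaiseWitness_leia_sulgude_siseseim_avaldis) = pvRaiseWitnessOut_leia_sulgude_siseseim_avaldis)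

-- ===== LEMMAS AND PROOFS =====

-- the depth after each character, as both programs compute it
def pvStep (s : Int) (c : Char) : Int := if c = '(' then s + 1 else if c = ')' then s - 1 else s
def pvDepths : Int → List Char → List Int
  | _, [] => []
  | s, c :: cs => pvStep s c :: pvDepths (pvStep s c) cs
def pvMax : List Int → Int
  | [] => 0
  | x :: xs => xs.foldl max x
def pvI0 (ds : List Int) (m : Int) : Nat := (List.idxOf? m ds).getD 0
-- the common characterisation of both results: the chars of the contiguous run of
-- maximal-depth positions following the first position of maximal depth
def pvRun (cs : List Char) : List Char :=
  let ds := pvDepths 0 cs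
  let m := pvMax ds
  (((cs.zip ds).drop (pvI0 ds m + 1)).takeWhile (fun p => p.2 == m)).map Prod.fst
-- B's 'collecting' flag: every depth from the first maximal position onward is maximal
def pvFlag (cs : List Char) : Bool :=
  let ds := pvDepths 0 cs
  (ds.drop (pvI0 ds (pvMax ds))).all (· == pvMax ds)

theorem pvDepths_length (s : Int) (cs : List Char) : (pvDepths s cs).length = cs.length := by
  induction cs generalizing s with
  | nil => rfl
  | cons c cs ih => simp [pvDepths, ih]

theorem pvDepths_append (s : Int) (cs : List Char) (c : Char) :
    pvDepths s (cs ++ [c]) = pvDepths s cs ++ [pvStep (cs.foldl pvStep s) c] := by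
  induction cs generalizing s with
  | nil => rfl
  | cons d cs ih => simp [pvDepths, ih]

theorem foldl_max_init (xs : List Int) (a : Int) : a ≤ xs.foldl max a := by
  induction xs generalizing a with
  | nil => simp
  | cons y ys ih => exact le_trans (le_max_left a y) (ih (max a y))

theorem foldl_max_le (xs : List Int) (x : Int) (hx : x ∈ xs) (a : Int) : x ≤ xs.foldl max a := by
  induction xs generalizing a with
  | nil => simp at hx
  | cons y ys ih =>
    rcases List.mem_cons.mp hx with h | h
    · subst h; exact le_trans (le_max_right a x) (foldl_max_init ys _)
    · exact ih h _

theorem foldl_max_mem (xs : List Int) (a : Int) : xs.foldl max a = a ∨ xs.foldl max a ∈ xs := by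
  induction xs generalizing a with
  | nil => simp
  | cons y ys ih =>
    rcases ih (max a y) with h | h
    · rcases max_cases a y with ⟨h2, _⟩ | ⟨h2, _⟩ <;> rw [List.foldl_cons, h, h2] <;> simp
    · simp [List.foldl_cons, h]

theorem pvMax_le (ds : List Int) (x : Int) (hx : x ∈ ds) : x ≤ pvMax ds := by
  cases ds with
  | nil => simp at hx
  | cons d dd =>
    rcases List.mem_cons.mp hx with h | h
    · subst h; exact foldl_max_init dd x
    · exact foldl_max_le dd x h d

theorem pvMax_mem (ds : List Int) (h : ds ≠ []) : pvMax ds ∈ ds := by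
  cases ds with
  | nil => simp at h
  | cons d dd =>
    rcases foldl_max_mem dd d with h2 | h2 <;> simp [pvMax, h2]

theorem pvMax_append (ds : List Int) (h : ds ≠ []) (y : Int) :
    pvMax (ds ++ [y]) = max (pvMax ds) y := by
  cases ds with
  | nil => simp at h
  | cons d dd => simp [pvMax]

theorem pvMax?_eq (ds : List Int) (h : ds ≠ []) :
    PySem.List.max? ds id = some (pvMax ds) := by
  cases ds with
  | nil => simp at h
  | cons d dd =>
    suffices H : ∀ (dd : List Int) (d : Int), PySem.List.max? (d :: dd) id = some (dd.foldl max d) from H dd d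
    intro dd
    induction dd with
    | nil => intro d; rfl
    | cons y ys ih =>
      intro d
      have h1 : PySem.List.max? (d :: y :: ys) id = PySem.List.max? (max d y :: ys) id := by
        simp only [PySem.List.max?, List.foldl_cons, id, max_def]
        by_cases h : d < y
        · simp [h, if_pos (by omega : d ≤ y)]
        · have : ¬ d ≤ y ∨ d = y := by omega
          rcases this with h2 | h2
          · simp [h, if_neg (by omega : ¬ d ≤ y)]
          · subst h2; simp
      rw [h1, ih (max d y)]
      simp [List.foldl_cons]

theorem pvI0_spec (ds : List Int) (m : Int) (hm : m ∈ ds) :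
    ∃ h : pvI0 ds m < ds.length,
      List.idxOf? m ds = some (pvI0 ds m) ∧ ds[pvI0 ds m] = m ∧
      ∀ j (_ : j < pvI0 ds m) (hl : j < ds.length), ds[j] ≠ m := by
  have hs : (List.idxOf? m ds).isSome := by
    rw [List.isSome_idxOf?]; exact hm
  obtain ⟨i, hi⟩ := Option.isSome_iff_exists.mp hs
  have h0 : pvI0 ds m = i := by simp [pvI0, hi]
  obtain ⟨hlt, hget, hprev⟩ := List.idxOf?_eq_some_iff.mp hi
  subst h0
  exact ⟨hlt, hi, hget, fun j hj _ => hprev j hj⟩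

-- A's first loop builds exactly pvDepths
theorem buildSid (cs : List Char) : ∀ (s : Int) (acc : List Int),
    cs.foldl (fun (st : Int × List Int) mark =>
      let s := if mark = '(' then st.1 + 1
               else if mark = ')' then st.1 - 1 else st.1
      (s, st.2 ++ [s])) (s, acc) = (cs.foldl pvStep s, acc ++ pvDepths s cs) := by
  induction cs with
  | nil => simp [pvDepths]
  | cons c cs ih =>
    intro s acc
    simp only [List.foldl_cons, ih, pvDepths, pvStep]
    simp

-- A's second loop (with break flag) collects the takeWhile-run
theorem loopA (Sid : List Int) (chars : List Char) (m : Int) (hlen : chars.length = Sid.length) :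
    ∀ (k j : Nat) (acc : List Char), j + k ≤ Sid.length →
    (((chars.zip Sid).drop j).takeWhile (fun p => p.2 == m)).length ≤ k →
    ((PySem.List.pyRange ((j : Int)) ((j : Int) + (k : Int)) 1).foldl
      (fun (st : List Char × Bool) indeks =>
        if st.2 then st
        else if PySem.List.pyGetD Sid indeks 0 ≠ m then (st.1, true)
        else (st.1 ++ [PySem.List.pyGetD chars indeks ' '], st.2))
      (acc, false)).1
    = acc ++ (((chars.zip Sid).drop j).takeWhile (fun p => p.2 == m)).map Prod.fst := by
  intro k
  induction k with
  | zero =>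
    intro j acc hb hw
    rw [PySem.List.pyRange_one_eq_nil (by omega)]
    have : (((chars.zip Sid).drop j).takeWhile (fun p => p.2 == m)) = [] :=
      List.eq_nil_of_length_eq_zero (by omega)
    simp [this]
  | succ k ih =>
    intro j acc hb hw
    have hj : j < Sid.length := by omega
    have hjc : j < chars.length := by omega
    have hjz : j < (chars.zip Sid).length := by simp [List.length_zip]; omega
    have hcons : (chars.zip Sid).drop j = (chars[j], Sid[j]) :: (chars.zip Sid).drop (j+1) := by
      rw [List.drop_eq_getElem_cons hjz]; simp [List.getElem_zip]
    have hrange : PySem.List.pyRange (j : Int) ((j : Int) + ((k : Int) + 1)) 1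
        = (j : Int) :: PySem.List.pyRange ((j : Int) + 1) ((j : Int) + ((k : Int) + 1)) 1 :=
      PySem.List.pyRange_one_cons (by omega)
    have hgetS : PySem.List.pyGetD Sid ((j : Int)) 0 = Sid[j] := by
      rw [PySem.List.pyGetD_natCast]; exact List.getD_eq_getElem _ _ hj
    have hgetC : PySem.List.pyGetD chars ((j : Int)) ' ' = chars[j] := by
      rw [PySem.List.pyGetD_natCast]; exact List.getD_eq_getElem _ _ hjc
    by_cases hd : Sid[j] = m
    · have : ((j : Int) + ((k : Int) + 1)) = ((j : Int) + 1) + (k : Int) := by ring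
      rw [show ((j : Int) + ((k + 1 : Nat) : Int)) = (j : Int) + ((k : Int) + 1) by push_cast; ring] at *
      rw [hrange]
      simp only [List.foldl_cons, if_neg (by simp : ¬ (false = true)), hgetS, hgetC]
      rw [if_neg (by simp [hd])]
      have heq : ((j : Int) + 1) = ((j + 1 : Nat) : Int) := by push_cast; ring
      rw [this, heq]
      rw [ih (j+1) (acc ++ [chars[j]]) (by omega) ?_]
      · rw [hcons]
        simp [hd]
      · rw [hcons] at hw
        simp only [List.takeWhile_cons, hd] at hw
        simp at hw ⊢
        omega
    · rw [show ((j : Int) + ((k + 1 : Nat) : Int)) = (j : Int) + ((k : Int) + 1) by push_cast; ring]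
      rw [hrange]
      simp only [List.foldl_cons, if_neg (by simp : ¬ (false = true)), hgetS]
      rw [if_pos (by simp [hd])]
      have hstay : ∀ (l : List Int) (st : List Char × Bool), st.2 = true →
          (l.foldl (fun (st : List Char × Bool) indeks =>
            if st.2 then st
            else if PySem.List.pyGetD Sid indeks 0 ≠ m then (st.1, true)
            else (st.1 ++ [PySem.List.pyGetD chars indeks ' '], st.2)) st) = st := by
        intro l
        induction l with
        | nil => intro st _; rfl
        | cons x xs ihl => intro st hst; simp only [List.foldl_cons, if_pos hst]; exact ihl st hst
      rw [hstay _ _ rfl]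
      rw [hcons]
      simp [hd]

-- A computes the common characterisation
theorem pvTA (avaldis : String) (h : avaldis.toList ≠ []) :
    leia_sulgude_siseseim_avaldis avaldis = String.ofList (pvRun avaldis.toList) := by
  unfold leia_sulgude_siseseim_avaldis
  set cs := avaldis.toList with hcs
  simp only [buildSid]
  set ds := pvDepths 0 cs with hds
  have hlen : cs.length = ds.length := (pvDepths_length 0 cs).symm
  have hdsne : ds ≠ [] := by
    intro he; apply h; apply List.eq_nil_of_length_eq_zero; rw [hlen, he]; rfl
  rw [show ([] : List Int) ++ ds = ds from rfl]
  rw [pvMax?_eq ds hdsne]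
  simp only
  set m := pvMax ds with hm
  have hmem : m ∈ ds := pvMax_mem ds hdsne
  obtain ⟨hi0lt, hidx, hget, hprev⟩ := pvI0_spec ds m hmem
  set i0 := pvI0 ds m with hi0
  have hidx' : (PySem.List.index? ds m).getD 0 = i0 := by
    simp [PySem.List.index?, hidx]
  rw [hidx']
  set cnt := PySem.List.count ds m with hcnt
  have hcntc : cnt = List.count m ds := rfl
  have hsplit : ds.take (i0+1) ++ ds.drop (i0+1) = ds := List.take_append_drop _ _
  have htake1 : (ds.take (i0+1)).count m = 1 := by
    rw [List.take_succ_eq_append_getElem hi0lt, List.count_append, hget]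
    have : (ds.take i0).count m = 0 := by
      rw [List.count_eq_zero]
      intro hmm
      obtain ⟨k, hk, he⟩ := List.getElem_of_mem hmm
      simp [List.length_take] at hk
      have hkl : k < ds.length := by omega
      have : (ds.take i0)[k] = ds[k] := List.getElem_take
      exact hprev k (by omega) hkl (by rw [← this, he])
    simp [this]
  have hcnteq : cnt = 1 + (ds.drop (i0+1)).count m := by
    rw [hcntc]
    conv_lhs => rw [← hsplit]
    rw [List.count_append, htake1]
  have hcntpos : 1 ≤ cnt := by omega
  have hdroplen : (ds.drop (i0+1)).length = ds.length - (i0+1) := by simp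
  have hbound : i0 + cnt ≤ ds.length := by
    have := List.count_le_length (l := ds.drop (i0+1)) (a := m)
    omega
  set t := ((cs.zip ds).drop (i0+1)).takeWhile (fun p => p.2 == m) with ht
  have hLle : t.length ≤ cnt - 1 := by
    have hsub : t.Sublist ((cs.zip ds).drop (i0+1)) := List.takeWhile_sublist _
    have hsub2 : (t.map Prod.snd).Sublist (((cs.zip ds).drop (i0+1)).map Prod.snd) :=
      List.Sublist.map _ hsub
    have hmapsnd : ((cs.zip ds).drop (i0+1)).map Prod.snd = ds.drop (i0+1) := by
      rw [List.map_drop, List.map_snd_zip (le_of_eq hlen.symm)]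
    rw [hmapsnd] at hsub2
    have hcount : (t.map Prod.snd).count m = (t.map Prod.snd).length := by
      rw [List.count_eq_length]
      intro b hb
      simp only [List.mem_map] at hb
      obtain ⟨p, hp, he⟩ := hb
      have := List.mem_takeWhile_imp hp
      simp at this
      omega
    have hle2 : (t.map Prod.snd).count m ≤ (List.drop (i0+1) ds).count m :=
      List.Sublist.count_le m hsub2
    have hlenmap : (t.map Prod.snd).length = t.length := List.length_map _
    omega
  have hcast1 : ((i0 : Int) + 1) = (((i0 + 1 : Nat)) : Int) := by push_cast; ring
  have hcast2 : ((i0 : Int) + (cnt : Int)) = (((i0+1 : Nat)) : Int) + (((cnt - 1 : Nat)) : Int) := by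
    push_cast [Nat.cast_sub hcntpos]; ring
  rw [hcast1, hcast2, loopA ds cs m hlen (cnt - 1) (i0+1) [] (by omega) (by omega)]
  simp only [List.nil_append]
  rfl

-- one step of B's fold preserves the invariant
theorem stepB (cs : List Char) (c : Char) (h : cs ≠ []) :
    (fun (st : Int × Option Int × List Char × Bool) ch =>
      let s := if ch = '(' then st.1 + 1 else if ch = ')' then st.1 - 1 else st.1
      match st.2.1 with
      | none => (s, some s, ([] : List Char), true)
      | some b =>
        if b < s then (s, some s, ([] : List Char), true)
        else if st.2.2.2 ∧ s = b then (s, some b, st.2.2.1 ++ [ch], true)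
        else (s, some b, st.2.2.1, false))
      (cs.foldl pvStep 0, some (pvMax (pvDepths 0 cs)), pvRun cs, pvFlag cs) c
    = ((cs ++ [c]).foldl pvStep 0, some (pvMax (pvDepths 0 (cs ++ [c]))), pvRun (cs ++ [c]), pvFlag (cs ++ [c])) := by
  simp only
  set fd := cs.foldl pvStep 0 with hfd
  set s' := pvStep fd c with hs'
  have hsif : (if c = '(' then fd + 1 else if c = ')' then fd - 1 else fd) = s' := rfl
  rw [hsif]
  set ds := pvDepths 0 cs with hds
  set m := pvMax ds with hm
  have hdsne : ds ≠ [] := by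
    intro he
    have hl := pvDepths_length 0 cs
    rw [← hds, he] at hl
    exact h (List.eq_nil_of_length_eq_zero hl.symm)
  have hlen : cs.length = ds.length := (pvDepths_length 0 cs).symm
  have hds' : pvDepths 0 (cs ++ [c]) = ds ++ [s'] := pvDepths_append 0 cs c
  have hfd' : (cs ++ [c]).foldl pvStep 0 = s' := by rw [List.foldl_append]; rfl
  have hmem : m ∈ ds := pvMax_mem ds hdsne
  obtain ⟨hi0lt, hidx, hget, hprev⟩ := pvI0_spec ds m hmem
  set i0 := pvI0 ds m with hi0
  rw [hfd', hds']
  by_cases hgt : m < s'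
  · -- new maximum: reset the run, start collecting
    have hmax' : pvMax (ds ++ [s']) = s' := by
      rw [pvMax_append ds hdsne]; omega
    have hi0' : pvI0 (ds ++ [s']) s' = ds.length := by
      have : List.idxOf? s' (ds ++ [s']) = some ds.length := by
        rw [List.idxOf?_eq_some_iff]
        refine ⟨by simp, by simp, ?_⟩
        intro j hj
        rw [List.getElem_append_left hj]
        have : ds[j] ≤ m := pvMax_le ds _ (List.getElem_mem hj)
        simp; omega
      simp [pvI0, this]
    have hrun' : pvRun (cs ++ [c]) = [] := by
      simp only [pvRun]
      rw [hds', hmax', hi0']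
      have : ((cs ++ [c]).zip (ds ++ [s'])).length = ds.length + 1 := by
        simp [List.length_zip]; omega
      rw [List.drop_eq_nil_of_le (by omega)]
      simp
    have hflag' : pvFlag (cs ++ [c]) = true := by
      simp only [pvFlag]
      rw [hds', hmax', hi0']
      rw [List.drop_append_of_le_length (le_refl _)]
      simp
    rw [hrun', hflag', hmax']
    simp [if_pos hgt]
  · -- depth stayed at or below the maximum
    have hle : s' ≤ m := by omega
    have hmax' : pvMax (ds ++ [s']) = m := by
      rw [pvMax_append ds hdsne]; omega
    have hi0' : pvI0 (ds ++ [s']) m = i0 := by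
      have : List.idxOf? m (ds ++ [s']) = some i0 := by
        rw [List.idxOf?_eq_some_iff]
        refine ⟨by simp only [List.length_append, List.length_cons, List.length_nil]; omega, ?_, ?_⟩
        · rw [List.getElem_append_left hi0lt]; exact hget
        · intro j hj
          rw [List.getElem_append_left (by omega)]
          exact hprev j hj (by omega)
      simp [pvI0, this]
    have hzip' : (cs ++ [c]).zip (ds ++ [s']) = cs.zip ds ++ [(c, s')] :=
      List.zip_append hlen
    have hdropzip : ((cs ++ [c]).zip (ds ++ [s'])).drop (i0 + 1)
        = (cs.zip ds).drop (i0 + 1) ++ [(c, s')] := by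
      rw [hzip', List.drop_append_of_le_length (by simp [List.length_zip]; omega)]
    have hmapsnd : ((cs.zip ds).drop (i0 + 1)).map Prod.snd = ds.drop (i0 + 1) := by
      rw [List.map_drop, List.map_snd_zip (le_of_eq hlen.symm)]
    have hdropcons : ds.drop i0 = m :: ds.drop (i0 + 1) := by
      rw [List.drop_eq_getElem_cons hi0lt, hget]
    have hflagchar : pvFlag cs = (ds.drop (i0 + 1)).all (· == m) := by
      simp only [pvFlag]
      rw [← hds, ← hm, ← hi0, hdropcons]
      simp
    have hfull : ((((cs.zip ds).drop (i0 + 1)).takeWhile (fun p => p.2 == m)).length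
        = ((cs.zip ds).drop (i0 + 1)).length) ↔ (ds.drop (i0 + 1)).all (· == m) = true := by
      constructor
      · intro hl
        have := List.Sublist.eq_of_length (List.takeWhile_sublist _) hl
        rw [List.all_eq_true]
        intro x hx
        rw [← hmapsnd] at hx
        obtain ⟨p, hp, he⟩ := List.mem_map.mp hx
        rw [← this] at hp
        have := List.mem_takeWhile_imp hp
        rw [← he]; exact this
      · intro ha
        congr 1
        apply List.takeWhile_eq_self_iff.mpr
        intro x hx
        have : x.2 ∈ ds.drop (i0 + 1) := by
          rw [← hmapsnd]; exact List.mem_map_of_mem hx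
        exact (List.all_eq_true.mp ha) _ this
    have hrunA : pvRun (cs ++ [c])
        = ((((cs.zip ds).drop (i0+1)) ++ [(c, s')]).takeWhile (fun p => p.2 == m)).map Prod.fst := by
      simp only [pvRun]
      rw [hds', hmax', hi0', hdropzip]
    have hflagA : pvFlag (cs ++ [c]) = (ds.drop i0 ++ [s']).all (· == m) := by
      simp only [pvFlag]
      rw [hds', hmax', hi0', List.drop_append_of_le_length (by omega)]
    by_cases hfl : pvFlag cs = true
    · have hallds : (ds.drop (i0+1)).all (· == m) = true := by rw [← hflagchar]; exact hfl
      have htw : ((cs.zip ds).drop (i0 + 1)).takeWhile (fun p => p.2 == m) = (cs.zip ds).drop (i0 + 1) := by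
        apply List.takeWhile_eq_self_iff.mpr
        intro x hx
        have : x.2 ∈ ds.drop (i0 + 1) := by rw [← hmapsnd]; exact List.mem_map_of_mem hx
        exact (List.all_eq_true.mp hallds) _ this
      by_cases hsm : s' = m
      · -- still collecting, depth still maximal: extend the run
        have hrun' : pvRun (cs ++ [c]) = pvRun cs ++ [c] := by
          rw [hrunA, List.takeWhile_append]
          rw [if_pos (by rw [htw])]
          have : pvRun cs = (((cs.zip ds).drop (i0+1)).takeWhile (fun p => p.2 == m)).map Prod.fst := rfl
          rw [this, htw]
          simp [hsm]
        have hflag' : pvFlag (cs ++ [c]) = true := by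
          rw [hflagA, hdropcons]
          simp [hsm]
          rw [List.all_eq_true] at hallds
          intro x hx
          simpa using hallds x hx
        rw [hrun', hflag', hmax']
        rw [if_neg hgt, if_pos ⟨hfl, hsm⟩]
      · -- the run stops exactly here
        have hrun' : pvRun (cs ++ [c]) = pvRun cs := by
          rw [hrunA, List.takeWhile_append]
          rw [if_pos (by rw [htw])]
          have : pvRun cs = (((cs.zip ds).drop (i0+1)).takeWhile (fun p => p.2 == m)).map Prod.fst := rfl
          rw [this, htw]
          have hone : List.takeWhile (fun p : Char × Int => p.2 == m) [(c, s')] = [] := by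
            simp [hsm]
          rw [hone, List.append_nil]
        have hflag' : pvFlag (cs ++ [c]) = false := by
          rw [hflagA]
          apply List.all_eq_false.mpr
          exact ⟨s', List.mem_append_right _ (by simp), by simpa using hsm⟩
        rw [hrun', hflag', hmax']
        rw [if_neg hgt, if_neg (by rintro ⟨_, h2⟩; exact hsm h2)]
    · -- collection already stopped earlier
      have hallds : ¬ ((ds.drop (i0+1)).all (· == m) = true) := by rw [← hflagchar]; exact hfl
      have hrun' : pvRun (cs ++ [c]) = pvRun cs := by
        rw [hrunA, List.takeWhile_append]
        rw [if_neg (fun hc => hallds (hfull.mp hc))]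
        rfl
      have hflag' : pvFlag (cs ++ [c]) = false := by
        have hf : (ds.drop (i0+1)).all (· == m) = false := by
          cases hbe : (ds.drop (i0+1)).all (· == m)
          · rfl
          · exact absurd hbe hallds
        obtain ⟨x, hx1, hx2⟩ := List.all_eq_false.mp hf
        rw [hflagA, hdropcons]
        apply List.all_eq_false.mpr
        exact ⟨x, List.mem_append_left _ (List.mem_cons_of_mem _ hx1), hx2⟩
      rw [hrun', hflag', hmax']
      have hflb : pvFlag cs = false := by simpa using hfl
      rw [if_neg hgt, if_neg (by rintro ⟨h1, _⟩; rw [hflb] at h1; exact absurd h1 (by simp))]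

-- B's whole fold computes the invariant state
theorem loopB (cs : List Char) (h : cs ≠ []) :
    cs.foldl (fun (st : Int × Option Int × List Char × Bool) ch =>
      let s := if ch = '(' then st.1 + 1 else if ch = ')' then st.1 - 1 else st.1
      match st.2.1 with
      | none => (s, some s, ([] : List Char), true)
      | some b =>
        if b < s then (s, some s, ([] : List Char), true)
        else if st.2.2.2 ∧ s = b then (s, some b, st.2.2.1 ++ [ch], true)
        else (s, some b, st.2.2.1, false))
      (0, none, [], false)
    = (cs.foldl pvStep 0, some (pvMax (pvDepths 0 cs)), pvRun cs, pvFlag cs) := by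
  induction cs using List.reverseRecOn with
  | nil => exact absurd rfl h
  | append_singleton cs c ih =>
    by_cases hcs : cs = []
    · subst hcs
      simp only [List.nil_append, List.foldl_cons, List.foldl_nil]
      have h1 : pvDepths 0 [c] = [pvStep 0 c] := rfl
      have h2 : pvMax [pvStep 0 c] = pvStep 0 c := rfl
      have h3 : pvI0 [pvStep 0 c] (pvStep 0 c) = 0 := by
        simp [pvI0, List.idxOf?_cons]
      have h4 : (if c = '(' then (0:Int) + 1 else if c = ')' then 0 - 1 else 0) = pvStep 0 c := rfl
      rw [h4]
      have h5 : pvRun [c] = [] := by simp [pvRun, h1, h2, h3]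
      have h6 : pvFlag [c] = true := by simp [pvFlag, h1, h2, h3]
      rw [h5, h6, h1, h2]
    · rw [List.foldl_append, ih hcs, List.foldl_cons, List.foldl_nil]
      exact stepB cs c hcs

-- B computes the common characterisation
theorem pvTB (avaldis : String) (h : avaldis.toList ≠ []) :
    leia_sulgude_siseseim_avaldis_alt avaldis = String.ofList (pvRun avaldis.toList) := by
  unfold leia_sulgude_siseseim_avaldis_alt
  rw [loopB _ h]

-- ===== VERDICT (by name: the statement is the Claim_ definition above) =====
theorem leia_sulgude_siseseim_avaldis_spec : Claim_equal_leia_sulgude_siseseim_avaldis := by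
  intro avaldis _ hpre
  unfold Spec_leia_sulgude_siseseim_avaldis
  have h : avaldis.toList ≠ [] := fun he => hpre (String.toList_eq_nil_iff.mp he)
  rw [pvTA avaldis h, pvTB avaldis h]

@[simp] theorem leia_sulgude_siseseim_avaldis_raises : Claim_raises_leia_sulgude_siseseim_avaldis := by
  unfold Claim_raises_leia_sulgude_siseseim_avaldis
  exact ⟨fun a _ hr hp => hp hr, by decide⟩
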